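-- pv_equiv track=rewrite | github.com/daniel-reich/ubiquitous-fiesta | Nh8xqtHAzoiaEyKrv_19.py | correct_sentences
-- ===== SOURCE A (Python) =====
-- def correct_sentences(s):
--     low = s.split()
--     low[0] = low[0].capitalize()
--     low[-1] += '.'
--     for i in range(1,len(low)):
--         if low[i][0].isupper():
--             low[i-1] += '.'
--     return ' '.join(low)
-- ===== SOURCE B (Python) =====
-- def correct_sentences(s):
--     words = s.split()
--     groups = []
--     cur = [words[0].capitalize()]
--     for w in words[1:]:
--         if w[0].isupper():
--             groups.append(cur)
--             cur = [w]
--         else: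
--             cur.append(w)
--     groups.append(cur)
--     return ' '.join(' '.join(g) + '.' for g in groups)
-- ===== Notes on version B (the rewrite author's own statement) =====
-- stated objective: alternative
-- what changed: A mutates the word list in place via an index loop, appending a period to word i-1 whenever word i starts uppercase (and to the last word); B instead makes one grouping pass that collects words into sentence groups (a new group at each uppercase-initial word), then joins each group and closes it with a period.
import Mathlib
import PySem

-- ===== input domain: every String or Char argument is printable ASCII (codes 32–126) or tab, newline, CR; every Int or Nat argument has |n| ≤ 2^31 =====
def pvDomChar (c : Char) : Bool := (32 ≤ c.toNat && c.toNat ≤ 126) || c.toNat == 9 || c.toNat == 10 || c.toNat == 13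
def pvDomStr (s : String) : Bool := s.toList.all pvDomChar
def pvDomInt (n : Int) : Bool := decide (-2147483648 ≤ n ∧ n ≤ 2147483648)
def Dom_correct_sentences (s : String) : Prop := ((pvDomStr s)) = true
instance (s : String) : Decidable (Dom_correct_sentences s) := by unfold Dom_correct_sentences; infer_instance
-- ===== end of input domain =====

-- B replaces A's index loop (append '.' to word i-1 whenever word i starts uppercase) by a single
-- grouping pass: words are collected into sentence groups, each group is joined and closed with '.'.
-- Objective: alternative decomposition, same cost.

-- w[0].isupper() on a word (default for the empty word is ' ', not upper — split words are never empty)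
def isU (w : List Char) : Bool := PySem.Chars.isupper (PySem.List.pyGetD w 0 ' ')

-- Python str.capitalize(): first char uppercased, rest lowercased (exact on ASCII)
def pyCap : List Char → List Char
  | [] => []
  | c :: rest => PySem.Chars.upperChar c :: PySem.Chars.lower rest

-- ===== PORT A =====
-- loop body: if low[i][0].isupper(): low[i-1] += '.'
def stepA (acc : List (List Char)) (i : Int) : List (List Char) :=
  if isU (PySem.List.pyGetD acc i []) = true then
    acc.set (i - 1).toNat (PySem.List.pyGetD acc (i - 1) [] ++ ['.'])
  else acc

def correct_sentences (s : String) : String :=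
  match PySem.Chars.split₀ s.toList with
  | [] => ""          -- Python raises IndexError here; excluded by Pre_
  | w :: t =>
    let low := pyCap w :: t                                        -- low[0] = low[0].capitalize()
    let low2 := low.dropLast ++ [low.getLastD [] ++ ['.']]         -- low[-1] += '.'
    let low3 := (PySem.List.pyRange 1 (low2.length : Int)).foldl stepA low2
    String.mk (PySem.Chars.join [' '] low3)

-- ===== PORT B =====
-- grouping pass: start a new sentence group when a word begins uppercase
def stepB (st : List (List (List Char)) × List (List Char)) (w : List Char) :
    List (List (List Char)) × List (List Char) :=
  if isU w = true then (st.1 ++ [st.2], [w]) else (st.1, st.2 ++ [w])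

def correct_sentences_alt (s : String) : String :=
  match PySem.Chars.split₀ s.toList with
  | [] => ""          -- Python raises IndexError here; excluded by Pre_
  | w :: t =>
    let st := t.foldl stepB ([], [pyCap w])
    let groups := st.1 ++ [st.2]
    String.mk (PySem.Chars.join [' ']
      (groups.map (fun g => PySem.Chars.join [' '] g ++ ['.'])))

-- ===== PRECONDITION & SPEC =====
-- Pre_ excludes only inputs with no non-whitespace characters, on which Python A raises IndexError (low[0] of an empty split).
def Pre_correct_sentences (s : String) : Prop := PySem.Chars.split₀ s.toList ≠ []
instance (s : String) : Decidable (Pre_correct_sentences s) := by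
  unfold Pre_correct_sentences; infer_instance

def pvWitness_correct_sentences : String := "hello there. my Friend"

def Spec_correct_sentences (s : String) (out : String) : Prop := out = correct_sentences_alt s
instance (s : String) (out : String) : Decidable (Spec_correct_sentences s out) := by
  unfold Spec_correct_sentences; infer_instance

-- ===== CLAIM (what is proved, stated in full; the proofs are below) =====
def Claim_equal_correct_sentences : Prop :=
  ∀ (s : String), Dom_correct_sentences s → Pre_correct_sentences s →
    Spec_correct_sentences s (correct_sentences s)

-- ===== LEMMAS AND PROOFS =====

-- the common specification: each word keeps its text; '.' is appended to the last word and to any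
-- word whose successor begins uppercase
def decorate : List (List Char) → List (List Char)
  | [] => []
  | [w] => [w ++ ['.']]
  | w :: w' :: t => (w ++ if isU w' = true then ['.'] else []) :: decorate (w' :: t)

-- B's grouping, as a function on the word list
def grp : List (List Char) → List (List Char) → List (List (List Char))
  | cur, [] => [cur]
  | cur, w :: t => if isU w = true then cur :: grp [w] t else grp (cur ++ [w]) t

theorem join_cons_ne_nil (x : List Char) (l : List (List Char)) (h : l ≠ []) :
    PySem.Chars.join [' '] (x :: l) = x ++ [' '] ++ PySem.Chars.join [' '] l := by
  cases l with
  | nil => exact absurd rfl h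
  | cons y t => exact PySem.Chars.join_cons_cons [' '] x y t

theorem decorate_ne_nil (w : List Char) (t : List (List Char)) : decorate (w :: t) ≠ [] := by
  cases t <;> simp [decorate]

theorem decorate_length (l : List (List Char)) : (decorate l).length = l.length := by
  induction l with
  | nil => rfl
  | cons w t ih =>
    cases t with
    | nil => rfl
    | cons w' t' => simp [decorate] at ih ⊢; omega

theorem isU_append_dot (w : List Char) : isU (w ++ ['.']) = isU w := by
  cases w with
  | nil => decide
  | cons c cs => simp [isU, PySem.List.pyGetD_ofNat']

theorem loopA_length (r : List Int) (m : List (List Char)) :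
    (r.foldl stepA m).length = m.length := by
  induction r generalizing m with
  | nil => rfl
  | cons i r ih =>
    simp only [List.foldl_cons]
    rw [ih]
    unfold stepA
    split <;> simp

theorem loopA_getD (k : Nat) (m : List (List Char)) (hk : k ≤ m.length) (j : Nat) :
    ((PySem.List.pyRange 1 (k : Int)).foldl stepA m).getD j [] =
      if j + 1 < k ∧ isU (m.getD (j + 1) []) = true then m.getD j [] ++ ['.']
      else m.getD j [] := by
  induction k generalizing j with
  | zero =>
    rw [show ((0 : Nat) : Int) = (0 : Int) by norm_num,
        show PySem.List.pyRange 1 0 = [] from rfl]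
    simp
  | succ k ih =>
    by_cases hk0 : k = 0
    · subst hk0
      rw [show ((1 : Nat) : Int) = (1 : Int) by norm_num,
          show PySem.List.pyRange 1 1 = [] from rfl]
      simp only [List.foldl_nil]
      rw [if_neg (by omega)]
    · have hk' : k ≤ m.length := by omega
      have hik := ih hk'
      have hlen : ((PySem.List.pyRange 1 (k : Int)).foldl stepA m).length = m.length :=
        loopA_length _ _
      rw [show ((k + 1 : Nat) : Int) = (k : Int) + 1 by push_cast; ring]
      rw [PySem.List.pyRange_one_append 1 (k : Int) ((k : Int) + 1) (by omega) (by omega)]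
      rw [show PySem.List.pyRange (k : Int) ((k : Int) + 1) = [(k : Int)] by
            rw [PySem.List.pyRange_one_cons (by omega)]
            rw [show PySem.List.pyRange ((k : Int) + 1) ((k : Int) + 1) = [] by
                  rw [List.eq_nil_iff_forall_not_mem]
                  intro x hx
                  rw [PySem.List.mem_pyRange_one] at hx
                  omega]]
      rw [List.foldl_append]
      simp only [List.foldl_cons, List.foldl_nil]
      set acc := (PySem.List.pyRange 1 (k : Int)).foldl stepA m with hacc
      unfold stepA
      rw [PySem.List.pyGetD_natCast acc k [],
          show acc.getD k [] = m.getD k [] by rw [hik k, if_neg (by omega)]]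
      by_cases hU : isU (m.getD k []) = true
      · rw [if_pos hU]
        rw [show ((k : Int) - 1) = ((k - 1 : Nat) : Int) by omega]
        rw [PySem.List.pyGetD_natCast acc (k - 1) [], Int.toNat_natCast,
            show acc.getD (k - 1) [] = m.getD (k - 1) [] by
              rw [hik (k - 1), if_neg (by omega)]]
        rw [List.getD_eq_getElem?_getD, List.getElem?_set]
        by_cases hj : k - 1 = j
        · rw [if_pos hj, if_pos (by rw [hlen]; omega)]
          subst hj
          rw [if_pos ⟨by omega, by rw [show k - 1 + 1 = k from by omega]; exact hU⟩]
          simp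
        · rw [if_neg hj, ← List.getD_eq_getElem?_getD, hik j]
          have hne : j + 1 ≠ k := by omega
          have hiff : (j + 1 < k ∧ isU (m.getD (j + 1) []) = true) ↔
              (j + 1 < k + 1 ∧ isU (m.getD (j + 1) []) = true) := by
            constructor <;> (rintro ⟨h1, h2⟩; exact ⟨by omega, h2⟩)
          rw [if_congr hiff rfl rfl]
      · rw [if_neg hU]
        rw [hik j]
        by_cases hjk : j + 1 = k
        · rw [if_neg (by omega), if_neg (by rintro ⟨h1, h2⟩; rw [hjk] at h2; exact hU h2)]
        · have hiff : (j + 1 < k ∧ isU (m.getD (j + 1) []) = true) ↔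
              (j + 1 < k + 1 ∧ isU (m.getD (j + 1) []) = true) := by
            constructor <;> (rintro ⟨h1, h2⟩; exact ⟨by omega, h2⟩)
          rw [if_congr hiff rfl rfl]

theorem m2_length (w : List Char) (t : List (List Char)) :
    ((w :: t).dropLast ++ [(w :: t).getLastD [] ++ ['.']]).length = (w :: t).length := by
  simp

theorem decorate_getD (l : List (List Char)) (j : Nat) (hj : j < l.length) :
    (decorate l).getD j [] =
      l.getD j [] ++ (if j + 1 = l.length ∨ isU (l.getD (j + 1) []) = true then ['.'] else []) := by
  induction l generalizing j with
  | nil => simp at hj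
  | cons w t ih =>
    cases t with
    | nil =>
      have : j = 0 := by simp at hj; omega
      subst this
      simp [decorate]
    | cons w' t' =>
      cases j with
      | zero =>
        have hiff : (isU w' = true) ↔
            (0 + 1 = (w :: w' :: t').length ∨ isU ((w :: w' :: t').getD (0 + 1) []) = true) := by
          constructor
          · intro h; right; simpa using h
          · intro h
            rcases h with h | h
            · exfalso; simp at h
            · simpa using h
        simp only [decorate, List.getD_cons_zero]
        rw [if_congr hiff rfl rfl]
      | succ i =>
        have hi : i < (w' :: t').length := by simp at hj ⊢; omega
        simp only [decorate, List.getD_cons_succ]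
        rw [ih i hi]
        congr 1
        apply if_congr _ rfl rfl
        constructor
        · intro hc
          rcases hc with hc | hc
          · left; simp at hc ⊢; omega
          · right; exact hc
        · intro hc
          rcases hc with hc | hc
          · left; simp at hc ⊢; omega
          · right; exact hc

theorem A_decorate (w : List Char) (t : List (List Char)) :
    ((PySem.List.pyRange 1
        ((((w :: t).dropLast ++ [(w :: t).getLastD [] ++ ['.']]).length : Nat) : Int)).foldl stepA
      ((w :: t).dropLast ++ [(w :: t).getLastD [] ++ ['.']])) = decorate (w :: t) := by
  have hm2 := m2_length w t
  have hgetlt : ∀ j, j < t.length →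
      ((w :: t).dropLast ++ [(w :: t).getLastD [] ++ ['.']]).getD j [] = (w :: t).getD j [] := by
    intro j hjlt
    have hdl : j < ((w :: t).dropLast).length := by simp; omega
    rw [List.getD_eq_getElem _ _ (by rw [hm2]; simp; omega),
        List.getElem_append_left hdl, List.getElem_dropLast,
        List.getD_eq_getElem _ _ (by simp; omega)]
  have hgetlast :
      ((w :: t).dropLast ++ [(w :: t).getLastD [] ++ ['.']]).getD t.length [] =
        (w :: t).getD t.length [] ++ ['.'] := by
    rw [List.getD_eq_getElem?_getD, List.getElem?_append_right (by simp)]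
    simp
    rw [List.getLast?_eq_getElem?]
    simp
  apply List.ext_getElem
  · rw [loopA_length, hm2, decorate_length]
  · intro j hj1 hj2
    have hjlt : j < t.length + 1 := by
      rw [loopA_length, hm2] at hj1; simpa using hj1
    rw [← List.getD_eq_getElem _ [] hj1, ← List.getD_eq_getElem _ [] hj2]
    rw [loopA_getD _ _ (le_refl _) j]
    rw [decorate_getD _ _ (by simpa using hjlt)]
    rw [hm2]
    by_cases hje : j = t.length
    · subst hje
      rw [if_neg (by rintro ⟨h1, _⟩; simp at h1), hgetlast,
          if_pos (by left; simp)]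
    · have hjlt' : j < t.length := by omega
      rw [hgetlt j hjlt']
      by_cases hnext : j + 1 = t.length
      · have e1 : (j + 1 < (w :: t).length ∧
            isU (((w :: t).dropLast ++ [(w :: t).getLastD [] ++ ['.']]).getD (j + 1) []) = true) ↔
            (isU ((w :: t).getD (j + 1) []) = true) := by
          rw [hnext, hgetlast, isU_append_dot]
          constructor
          · intro hc; exact hc.2
          · intro hc; exact ⟨by simp, hc⟩
        have e2 : (j + 1 = (w :: t).length ∨ isU ((w :: t).getD (j + 1) []) = true) ↔
            (isU ((w :: t).getD (j + 1) []) = true) := by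
          constructor
          · intro hc
            rcases hc with hc | hc
            · exfalso; simp at hc; omega
            · exact hc
          · intro hc; right; exact hc
        rw [if_congr e1 rfl rfl, if_congr e2 rfl rfl]
        split
        · rfl
        · simp
      · have e1 : (j + 1 < (w :: t).length ∧
            isU (((w :: t).dropLast ++ [(w :: t).getLastD [] ++ ['.']]).getD (j + 1) []) = true) ↔
            (isU ((w :: t).getD (j + 1) []) = true) := by
          rw [hgetlt (j + 1) (by omega)]
          constructor
          · intro hc; exact hc.2
          · intro hc; exact ⟨by simp; omega, hc⟩
        have e2 : (j + 1 = (w :: t).length ∨ isU ((w :: t).getD (j + 1) []) = true) ↔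
            (isU ((w :: t).getD (j + 1) []) = true) := by
          constructor
          · intro hc
            rcases hc with hc | hc
            · exfalso; simp at hc; omega
            · exact hc
          · intro hc; right; exact hc
        rw [if_congr e1 rfl rfl, if_congr e2 rfl rfl]
        split
        · rfl
        · simp

theorem grp_ne_nil (cur : List (List Char)) (t : List (List Char)) : grp cur t ≠ [] := by
  induction t generalizing cur with
  | nil => simp [grp]
  | cons w t ih => unfold grp; split <;> simp [ih]

theorem foldB_grp (t : List (List Char)) (groups : List (List (List Char)))
    (cur : List (List Char)) :
    (t.foldl stepB (groups, cur)).1 ++ [(t.foldl stepB (groups, cur)).2] =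
      groups ++ grp cur t := by
  induction t generalizing groups cur with
  | nil => simp [grp]
  | cons w t ih =>
    simp only [List.foldl_cons]
    by_cases hw : isU w = true
    · rw [show stepB (groups, cur) w = (groups ++ [cur], [w]) from by simp [stepB, hw]]
      rw [ih, show grp cur (w :: t) = cur :: grp [w] t from by simp [grp, hw]]
      simp
    · rw [show stepB (groups, cur) w = (groups, cur ++ [w]) from by simp [stepB, hw]]
      rw [ih, show grp cur (w :: t) = grp (cur ++ [w]) t from by simp [grp, hw]]

theorem join_decorate_closed (c : List Char) (cs : List (List Char))
    (h : ∀ x ∈ cs, isU x = false) :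
    PySem.Chars.join [' '] (decorate (c :: cs)) =
      PySem.Chars.join [' '] (c :: cs) ++ ['.'] := by
  induction cs generalizing c with
  | nil => simp [decorate, PySem.Chars.join_singleton]
  | cons d ds ih =>
    have hd : isU d = false := h d (by simp)
    have hrec := ih d (fun x hx => h x (by simp [hx]))
    rw [show decorate (c :: d :: ds) = c :: decorate (d :: ds) by simp [decorate, hd]]
    rw [join_cons_ne_nil c _ (decorate_ne_nil d ds), hrec,
        join_cons_ne_nil c (d :: ds) (by simp)]
    simp

theorem join_decorate_split (c : List Char) (cs : List (List Char)) (w : List Char)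
    (t : List (List Char)) (h : ∀ x ∈ cs, isU x = false) (hw : isU w = true) :
    PySem.Chars.join [' '] (decorate (c :: (cs ++ w :: t))) =
      PySem.Chars.join [' '] (c :: cs) ++ ['.'] ++ [' '] ++
        PySem.Chars.join [' '] (decorate (w :: t)) := by
  induction cs generalizing c with
  | nil =>
    rw [show decorate (c :: ([] ++ w :: t)) = (c ++ ['.']) :: decorate (w :: t) by
          simp [decorate, hw]]
    rw [join_cons_ne_nil _ _ (decorate_ne_nil w t)]
    simp [PySem.Chars.join_singleton]
  | cons d ds ih =>
    have hd : isU d = false := h d (by simp)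
    have hrec := ih d (fun x hx => h x (by simp [hx]))
    rw [show decorate (c :: (d :: ds ++ w :: t)) = c :: decorate (d :: (ds ++ w :: t)) by
          simp [decorate, hd]]
    rw [join_cons_ne_nil c _ (decorate_ne_nil d _), hrec,
        join_cons_ne_nil c (d :: ds) (by simp)]
    simp

theorem grp_join (t : List (List Char)) (c : List Char) (cs : List (List Char))
    (h : ∀ x ∈ cs, isU x = false) :
    PySem.Chars.join [' ']
        ((grp (c :: cs) t).map (fun g => PySem.Chars.join [' '] g ++ ['.'])) =
      PySem.Chars.join [' '] (decorate (c :: (cs ++ t))) := by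
  induction t generalizing c cs with
  | nil => simp [grp, PySem.Chars.join_singleton, join_decorate_closed c cs h]
  | cons w t ih =>
    by_cases hw : isU w = true
    · rw [show grp (c :: cs) (w :: t) = (c :: cs) :: grp [w] t by simp [grp, hw]]
      simp only [List.map_cons]
      rw [join_cons_ne_nil _ _ (by simp [grp_ne_nil]),
          ih w [] (by simp), join_decorate_split c cs w t h hw]
      simp
    · have hcs : ∀ x ∈ cs ++ [w], isU x = false := by
        intro x hx
        rcases List.mem_append.1 hx with h1 | h1
        · exact h x h1
        · simp at h1; subst h1; simpa using hw
      rw [show grp (c :: cs) (w :: t) = grp (c :: (cs ++ [w])) t by simp [grp, hw]]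
      rw [ih c (cs ++ [w]) hcs]
      simp [List.append_assoc]

-- ===== VERDICT (by name: the statement is the Claim_ definition above) =====
theorem correct_sentences_spec : Claim_equal_correct_sentences := by
  intro s _ hpre
  unfold Spec_correct_sentences correct_sentences correct_sentences_alt
  cases h : PySem.Chars.split₀ s.toList with
  | nil => exact absurd h hpre
  | cons w t =>
    simp only []
    congr 1
    rw [A_decorate (pyCap w) t]
    rw [foldB_grp t [] [pyCap w], List.nil_append,
        grp_join t (pyCap w) [] (by simp)]
    simp
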